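-- pv_equiv track=rewrite | github.com/waldohidalgo/geek-for-geeks-100daysofcodechallenge | day001-010/day9/Modify the Array.py | modifyAndRearrangeArr
-- ===== SOURCE A (Python) =====
-- def modifyAndRearrangeArr (arr) :
--     #Complete the function
--     n=len(arr)
--     if n==1:
--         return arr
--
--     index = 0
--     for i in range(n - 1):
--         if arr[i] == arr[i + 1] and arr[i] != 0:
--             arr[index] = arr[i] * 2
--             arr[i + 1] = 0
--             index += 1
--         elif arr[i] != 0:
--             arr[index] = arr[i]
--             index += 1
--
--     if n>1 and arr[n - 1] != 0:
--         arr[index] = arr[n - 1]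
--         index += 1
--
--     for i in range(index, n):
--         arr[i] = 0
--
--     return arr
-- ===== SOURCE B (Python) =====
-- def modifyAndRearrangeArr(arr):
--     # Two separate phases instead of A's fused write-pointer pass:
--     # (1) merge adjacent equal nonzero pairs in place, (2) compact nonzeros and pad with zeros.
--     n = len(arr)
--     for i in range(n - 1):
--         if arr[i] == arr[i + 1] and arr[i] != 0:
--             arr[i] *= 2
--             arr[i + 1] = 0
--     result = [x for x in arr if x != 0]
--     result += [0] * (n - len(result))
--     arr[:] = result
--     return arr
-- ===== Notes on version B (the rewrite author's own statement) =====
-- stated objective: simpler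
-- what changed: A's single fused pass with a write-pointer (index) is replaced by two separate phases: an in-place adjacent-merge pass, then zero-compaction by filtering nonzeros and padding with zeros.
import Mathlib
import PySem

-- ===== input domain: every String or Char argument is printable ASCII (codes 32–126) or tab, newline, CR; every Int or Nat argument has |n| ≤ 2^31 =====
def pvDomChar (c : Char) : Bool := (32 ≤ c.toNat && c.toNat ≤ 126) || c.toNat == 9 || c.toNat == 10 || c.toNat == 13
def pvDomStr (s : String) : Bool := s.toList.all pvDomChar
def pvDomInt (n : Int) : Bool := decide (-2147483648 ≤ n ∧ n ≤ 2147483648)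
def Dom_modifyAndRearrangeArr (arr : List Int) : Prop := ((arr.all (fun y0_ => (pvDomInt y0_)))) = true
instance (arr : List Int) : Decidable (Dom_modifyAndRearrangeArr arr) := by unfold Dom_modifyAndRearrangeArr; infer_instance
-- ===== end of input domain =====

-- B is A rewritten as two separate phases (merge pass, then zero-compaction); both Pythons mutate
-- `arr` to the same final contents, and the equivalence proved here is about the return value.

-- ===== PORT A =====
-- A's main loop: for i in range(n-1) with write-pointer idx; all indices are provably in range,
-- so Python's arr[i] is ported as getD (exact here).
def pvLoopA (a : List Int) (idx i stop : Nat) : List Int × Nat :=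
  if i < stop then
    if a.getD i 0 == a.getD (i + 1) 0 && a.getD i 0 != 0 then
      pvLoopA ((a.set idx (a.getD i 0 * 2)).set (i + 1) 0) (idx + 1) (i + 1) stop
    else if a.getD i 0 != 0 then
      pvLoopA (a.set idx (a.getD i 0)) (idx + 1) (i + 1) stop
    else
      pvLoopA a idx (i + 1) stop
  else (a, idx)
termination_by stop - i

-- A's final loop: for i in range(idx, n): arr[i] = 0
def pvFillA (a : List Int) (i n : Nat) : List Int :=
  if i < n then pvFillA (a.set i 0) (i + 1) n else a
termination_by n - i

def modifyAndRearrangeArr (arr : List Int) : List Int :=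
  let n := arr.length
  if n = 1 then arr
  else
    let p := pvLoopA arr 0 0 (n - 1)
    let p :=
      if 1 < n ∧ p.1.getD (n - 1) 0 ≠ 0 then (p.1.set p.2 (p.1.getD (n - 1) 0), p.2 + 1)
      else p
    pvFillA p.1 p.2 n

-- ===== PORT B =====
-- B's first phase: for i in range(n-1): if arr[i]==arr[i+1] and arr[i]!=0: arr[i]*=2; arr[i+1]=0
def pvMergeB (a : List Int) (i stop : Nat) : List Int :=
  if i < stop then
    if a.getD i 0 == a.getD (i + 1) 0 && a.getD i 0 != 0 then
      pvMergeB ((a.set i (a.getD i 0 * 2)).set (i + 1) 0) (i + 1) stop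
    else
      pvMergeB a (i + 1) stop
  else a
termination_by stop - i

def modifyAndRearrangeArr_alt (arr : List Int) : List Int :=
  let n := arr.length
  let a := pvMergeB arr 0 (n - 1)
  let result := a.filter (fun x => x != 0)
  result ++ List.replicate (n - result.length) 0

-- ===== PRECONDITION & SPEC =====
def Spec_modifyAndRearrangeArr (arr : List Int) (out : List Int) : Prop := out = modifyAndRearrangeArr_alt arr
instance (arr : List Int) (out : List Int) : Decidable (Spec_modifyAndRearrangeArr arr out) := by unfold Spec_modifyAndRearrangeArr; infer_instance

-- ===== CLAIM (what is proved, stated in full; the proofs are below) =====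
def Claim_equal_modifyAndRearrangeArr : Prop := ∀ (arr : List Int), Dom_modifyAndRearrangeArr arr → Spec_modifyAndRearrangeArr arr (modifyAndRearrangeArr arr)

-- ===== LEMMAS AND PROOFS =====

-- helper lemmas for the proofs

theorem pv_getD_eq_of_drop {a b : List Int} {i j : Nat} (h : a.drop i = b.drop i) (hij : i ≤ j) :
    a.getD j 0 = b.getD j 0 := by
  have hj : a[j]? = b[j]? := by
    have h0 : (a.drop i)[j - i]? = (b.drop i)[j - i]? := by rw [h]
    simpa [List.getElem?_drop, Nat.add_sub_cancel' hij] using h0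
  simp [List.getD_eq_getElem?_getD, hj]

theorem pv_take_set_succ (l : List Int) (i : Nat) (x : Int) (h : i < l.length) :
    (l.set i x).take (i + 1) = l.take i ++ [x] := by
  rw [List.take_add_one, List.take_set,
    List.set_eq_of_length_le (by simp), List.getElem?_set_self h]
  rfl

theorem pv_take_set_ge (l : List Int) (j k : Nat) (x : Int) (h : k ≤ j) :
    (l.set j x).take k = l.take k := by
  rw [List.take_set]
  exact List.set_eq_of_length_le (le_trans (by simp) h)

theorem pv_drop_set_lt (l : List Int) (j k : Nat) (x : Int) (h : j < k) :
    (l.set j x).drop k = l.drop k := by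
  rw [List.drop_set, if_pos h]

theorem pv_drop_succ_eq {a b : List Int} {i : Nat} (h : a.drop i = b.drop i) :
    a.drop (i + 1) = b.drop (i + 1) := by
  rw [← List.drop_drop (i := 1) (j := i), ← List.drop_drop (i := 1) (j := i), h]

theorem pv_take_succ_getD (l : List Int) (i : Nat) (h : i < l.length) :
    l.take (i + 1) = l.take i ++ [l.getD i 0] := by
  rw [List.take_add_one, List.getD_eq_getElem l 0 h]
  simp [List.getElem?_eq_getElem h]

theorem pvFillA_eq_aux : ∀ (k : Nat) (a : List Int) (i n : Nat), n - i ≤ k → a.length = n →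
    pvFillA a i n = a.take i ++ List.replicate (n - i) 0 := by
  intro k
  induction k with
  | zero =>
    intro a i n hk hn
    have hni : n ≤ i := by omega
    have h1 : ¬ i < n := by omega
    have h2 : a.length ≤ i := by omega
    rw [pvFillA, if_neg h1]
    simp [List.take_of_length_le h2, Nat.sub_eq_zero_of_le hni]
  | succ k ih =>
    intro a i n hk hn
    by_cases hlt : i < n
    · rw [pvFillA, if_pos hlt]
      rw [ih (a.set i 0) (i + 1) n (by omega) (by simp [hn])]
      rw [pv_take_set_succ a i 0 (by omega)]
      have : n - i = (n - (i + 1)) + 1 := by omega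
      rw [this, List.replicate_succ, List.append_assoc]
      rfl
    · rw [pvFillA, if_neg hlt]
      have hni : n ≤ i := by omega
      have h2 : a.length ≤ i := by omega
      simp [List.take_of_length_le h2, Nat.sub_eq_zero_of_le hni]

theorem pvFillA_eq (a : List Int) (i n : Nat) (hn : a.length = n) :
    pvFillA a i n = a.take i ++ List.replicate (n - i) 0 :=
  pvFillA_eq_aux (n - i) a i n le_rfl hn

theorem pvLoop_inv : ∀ (fuel : Nat) (a b : List Int) (idx i stop : Nat),
    stop - i ≤ fuel → i ≤ stop → stop < a.length → a.length = b.length → idx ≤ i →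
    a.drop i = b.drop i →
    a.take idx = (b.take i).filter (fun x => x != 0) →
    (pvLoopA a idx i stop).1.drop stop = (pvMergeB b i stop).drop stop ∧
    (pvLoopA a idx i stop).1.take (pvLoopA a idx i stop).2
      = ((pvMergeB b i stop).take stop).filter (fun x => x != 0) ∧
    (pvLoopA a idx i stop).1.length = a.length ∧
    (pvMergeB b i stop).length = b.length ∧
    (pvLoopA a idx i stop).2 ≤ stop := by
  intro fuel
  induction fuel with
  | zero =>
    intro a b idx i stop hf hi hs hl hidx hdrop htake
    have hstop : i = stop := by omega
    subst hstop
    rw [pvLoopA, pvMergeB, if_neg (by omega), if_neg (by omega)]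
    exact ⟨hdrop, htake, rfl, rfl, hidx⟩
  | succ k ih =>
    intro a b idx i stop hf hi hs hl hidx hdrop htake
    by_cases hlt : i < stop
    · have hia : i < a.length := by omega
      have hib : i < b.length := by omega
      have hi1a : i + 1 < a.length := by omega
      have hi1b : i + 1 < b.length := by omega
      have hv : a.getD i 0 = b.getD i 0 := pv_getD_eq_of_drop hdrop le_rfl
      have hw : a.getD (i + 1) 0 = b.getD (i + 1) 0 := pv_getD_eq_of_drop hdrop (by omega)
      rw [pvLoopA, pvMergeB, if_pos hlt, if_pos hlt]
      by_cases hc : (a.getD i 0 == a.getD (i + 1) 0 && a.getD i 0 != 0) = true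
      · -- merge branch
        have hcb : (b.getD i 0 == b.getD (i + 1) 0 && b.getD i 0 != 0) = true := by
          rw [← hv, ← hw]; exact hc
        rw [if_pos hc, if_pos hcb, ← hv]
        have hvne : a.getD i 0 ≠ 0 := by
          simp only [Bool.and_eq_true, bne_iff_ne, ne_eq] at hc; exact hc.2
        set v := a.getD i 0 with hvdef
        have h2ne : (v * 2 != 0) = true := by simp; omega
        have hd' : ((a.set idx (v * 2)).set (i + 1) 0).drop (i + 1)
            = ((b.set i (v * 2)).set (i + 1) 0).drop (i + 1) := by
          rw [List.drop_set, if_neg (by omega), Nat.sub_self]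
          rw [List.drop_set (l := b.set i (v * 2)), if_neg (by omega), Nat.sub_self]
          rw [pv_drop_set_lt _ idx (i + 1) _ (by omega)]
          rw [pv_drop_set_lt _ i (i + 1) _ (by omega)]
          rw [pv_drop_succ_eq hdrop]
        have ht' : ((a.set idx (v * 2)).set (i + 1) 0).take (idx + 1)
            = (((b.set i (v * 2)).set (i + 1) 0).take (i + 1)).filter (fun x => x != 0) := by
          rw [pv_take_set_ge _ (i + 1) (idx + 1) _ (by omega)]
          rw [pv_take_set_succ a idx _ (by omega)]
          rw [pv_take_set_ge _ (i + 1) (i + 1) _ le_rfl]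
          rw [pv_take_set_succ b i _ hib]
          rw [List.filter_append, htake]
          have h2b : (b.getD i 0 * 2 != 0) = true := by rw [← hv]; exact h2ne
          simp only [List.getD_eq_getElem?_getD] at h2b
          simp [h2b, hv, List.getD_eq_getElem?_getD]
        have key := ih ((a.set idx (v * 2)).set (i + 1) 0) ((b.set i (v * 2)).set (i + 1) 0)
          (idx + 1) (i + 1) stop (by omega) (by omega) (by simp; omega) (by simp [hl])
          (by omega) hd' ht'
        refine ⟨key.1, key.2.1, ?_, ?_, key.2.2.2.2⟩
        · rw [key.2.2.1]; simp
        · rw [key.2.2.2.1]; simp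
      · -- no-merge branches
        have hcb : ¬ (b.getD i 0 == b.getD (i + 1) 0 && b.getD i 0 != 0) = true := by
          rw [← hv, ← hw]; exact hc
        rw [if_neg hc, if_neg hcb]
        by_cases hz : (a.getD i 0 != 0) = true
        · rw [if_pos hz]
          have hd' : (a.set idx (a.getD i 0)).drop (i + 1) = b.drop (i + 1) := by
            rw [pv_drop_set_lt _ idx (i + 1) _ (by omega)]
            exact pv_drop_succ_eq hdrop
          have ht' : (a.set idx (a.getD i 0)).take (idx + 1)
              = (b.take (i + 1)).filter (fun x => x != 0) := by
            rw [pv_take_set_succ a idx _ (by omega)]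
            rw [pv_take_succ_getD b i hib]
            rw [List.filter_append, htake, ← hv]
            simp only [List.getD_eq_getElem?_getD] at hz
            simp [hz, List.getD_eq_getElem?_getD]
          have key := ih (a.set idx (a.getD i 0)) b (idx + 1) (i + 1) stop
            (by omega) (by omega) (by simp; omega) (by simp [hl]) (by omega) hd' ht'
          refine ⟨key.1, key.2.1, ?_, key.2.2.2.1, key.2.2.2.2⟩
          rw [key.2.2.1]; simp
        · rw [if_neg hz]
          have ht' : a.take idx = (b.take (i + 1)).filter (fun x => x != 0) := by
            rw [pv_take_succ_getD b i hib]
            rw [List.filter_append, htake, ← hv]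
            simp at hz
            simp [hz]
          exact ih a b idx (i + 1) stop (by omega) (by omega) (by omega) hl (by omega)
            (pv_drop_succ_eq hdrop) ht'
    · have hstop : i = stop := by omega
      subst hstop
      rw [pvLoopA, pvMergeB, if_neg (by omega), if_neg (by omega)]
      exact ⟨hdrop, htake, rfl, rfl, hidx⟩

-- ===== VERDICT (by name: the statement is the Claim_ definition above) =====
theorem pv_drop_last (M : List Int) (n : Nat) (hn : M.length = n) (h2 : 1 ≤ n) :
    M.drop (n - 1) = [M.getD (n - 1) 0] := by
  have hlt : n - 1 < M.length := by omega
  rw [List.drop_eq_getElem_cons hlt, List.getD_eq_getElem M 0 hlt]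
  have : n - 1 + 1 = M.length := by omega
  rw [this, List.drop_length]

theorem modifyAndRearrangeArr_spec : Claim_equal_modifyAndRearrangeArr := by
  intro arr _
  unfold Spec_modifyAndRearrangeArr modifyAndRearrangeArr modifyAndRearrangeArr_alt
  by_cases h1 : arr.length = 1
  · obtain ⟨x, hx⟩ : ∃ x, arr = [x] := by
      cases arr with
      | nil => simp at h1
      | cons y t =>
        cases t with
        | nil => exact ⟨y, rfl⟩
        | cons _ _ => simp at h1
    subst hx
    by_cases hx0 : x = 0 <;> simp [pvMergeB, hx0]
  · by_cases h0 : arr.length = 0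
    · rw [List.length_eq_zero_iff] at h0
      subst h0
      simp [pvLoopA, pvMergeB, pvFillA]
    · have hn2 : 2 ≤ arr.length := by omega
      obtain ⟨hdrop, htake, hlenA, hlenM, hidx2⟩ :=
        pvLoop_inv (arr.length - 1) arr arr 0 0 (arr.length - 1) le_rfl (by omega) (by omega)
          rfl (by omega) rfl (by simp)
      simp only [if_neg h1]
      set p := pvLoopA arr 0 0 (arr.length - 1) with hp
      set M := pvMergeB arr 0 (arr.length - 1) with hM
      set z := M.getD (arr.length - 1) 0 with hz
      have hgz : p.1.getD (arr.length - 1) 0 = z := by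
        have := pv_getD_eq_of_drop hdrop (le_refl (arr.length - 1))
        simpa using this
      have hMsplit : (M.take (arr.length - 1)).filter (fun x => x != 0) ++
          [z].filter (fun x => x != 0) = M.filter (fun x => x != 0) := by
        conv_rhs => rw [← List.take_append_drop (arr.length - 1) M]
        rw [pv_drop_last M arr.length hlenM (by omega), List.filter_append]
      have hidxlen : p.2 = ((M.take (arr.length - 1)).filter (fun x => x != 0)).length := by
        have := congrArg List.length htake
        simpa [List.length_take, hlenA, Nat.min_eq_left (by omega : p.2 ≤ arr.length)] using this
      by_cases hzz : z ≠ 0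
      · rw [if_pos ⟨by omega, by rw [hgz]; exact hzz⟩]
        rw [pvFillA_eq _ _ _ (by simp [hlenA])]
        rw [hgz, pv_take_set_succ p.1 p.2 z (by omega), htake]
        have hfz : [z].filter (fun x => x != 0) = [z] := by simp [hzz]
        rw [← hMsplit, hfz]
        have hlen2 : ((M.take (arr.length - 1)).filter (fun x => x != 0) ++ [z]).length
            = p.2 + 1 := by simp [hidxlen]
        rw [hlen2]
      · rw [if_neg (by rw [hgz]; tauto)]
        rw [pvFillA_eq _ _ _ hlenA, htake]
        have hfz : [z].filter (fun x => x != 0) = [] := by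
          simp at hzz; simp [hzz]
        rw [← hMsplit, hfz, List.append_nil]
        congr 1
        rw [← hidxlen]
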